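-- pv_equiv track=rewrite | github.com/kartikpunjabi111/datasci | writing_user_location.py | segm_id
-- ===== SOURCE A (Python) =====
-- def segm_id(tokenized_text):
--     '''
--     Creating segement IDs , refer to pytorch pre-trained bert model
--     '''
--     z=0
--     segments_ids=[0,0]
--     segments_ids=[]
--     for a in tokenized_text:
--         if (a == '|'):
--             z=1
--         segments_ids.append(z)
--     return segments_ids
-- ===== SOURCE B (Python) =====
-- def segm_id(tokenized_text):
--     try:
--         i = tokenized_text.index('|')
--     except ValueError:
--         i = len(tokenized_text)
--     return [0] * i + [1] * (len(tokenized_text) - i)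
-- ===== Notes on version B (the rewrite author's own statement) =====
-- stated objective: simpler
-- what changed: Replaces the per-element running-flag append loop with computing the index of the first '|' and concatenating two homogeneous runs [0]*i + [1]*(n-i).
import Mathlib
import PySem

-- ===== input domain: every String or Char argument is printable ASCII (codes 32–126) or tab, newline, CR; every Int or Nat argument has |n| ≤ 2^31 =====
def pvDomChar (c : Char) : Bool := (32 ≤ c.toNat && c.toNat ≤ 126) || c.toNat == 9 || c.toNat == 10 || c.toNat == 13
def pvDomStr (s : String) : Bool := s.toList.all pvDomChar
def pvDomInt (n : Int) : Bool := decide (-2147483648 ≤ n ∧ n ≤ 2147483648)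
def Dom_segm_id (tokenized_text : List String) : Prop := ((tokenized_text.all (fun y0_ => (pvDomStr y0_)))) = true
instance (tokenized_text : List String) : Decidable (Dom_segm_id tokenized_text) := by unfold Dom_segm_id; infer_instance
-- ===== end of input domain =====

-- B replaces A's running-flag append loop with a split-point computation and two homogeneous runs (objective: simpler).

-- ===== PORT A =====
-- running flag z and accumulator, exactly A's loop (z set before the append, so '|' itself gets 1)
def segmStepA (st : Int × List Int) (a : String) : Int × List Int :=
  let z := if a = "|" then 1 else st.1
  (z, st.2 ++ [z])

def segm_id (tokenized_text : List String) : List Int :=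
  (tokenized_text.foldl segmStepA (0, [])).2

-- ===== PORT B =====
def segm_id_alt (tokenized_text : List String) : List Int :=
  let i := match PySem.List.index? tokenized_text "|" with
    | some k => k
    | none => tokenized_text.length
  List.replicate i 0 ++ List.replicate (tokenized_text.length - i) 1

-- ===== PRECONDITION & SPEC =====
def Spec_segm_id (tokenized_text : List String) (out : List Int) : Prop := out = segm_id_alt tokenized_text
instance (tokenized_text : List String) (out : List Int) : Decidable (Spec_segm_id tokenized_text out) := by unfold Spec_segm_id; infer_instance

-- ===== CLAIM (what is proved, stated in full; the proofs are below) =====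
def Claim_equal_segm_id : Prop := ∀ (tokenized_text : List String), Dom_segm_id tokenized_text → Spec_segm_id tokenized_text (segm_id tokenized_text)

-- ===== LEMMAS AND PROOFS =====

theorem segm_loop_one (xs : List String) (acc : List Int) :
    (xs.foldl segmStepA (1, acc)) = (1, acc ++ List.replicate xs.length 1) := by
  induction xs generalizing acc with
  | nil => simp
  | cons x xs ih =>
    have hstep : segmStepA (1, acc) x = (1, acc ++ [1]) := by
      unfold segmStepA; split <;> rfl
    simp only [List.foldl_cons, hstep, ih]
    simp [List.replicate_succ]

theorem segm_loop_zero (xs : List String) (acc : List Int) :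
    (xs.foldl segmStepA (0, acc)).2 =
    acc ++ (match PySem.List.index? xs "|" with
      | some k => List.replicate k 0 ++ List.replicate (xs.length - k) 1
      | none => List.replicate xs.length 0) := by
  induction xs generalizing acc with
  | nil => simp [PySem.List.index?]
  | cons x xs ih =>
    by_cases hx : x = "|"
    · subst hx
      rw [PySem.List.index?_cons_self]
      have hstep : segmStepA (0, acc) "|" = (1, acc ++ [1]) := by rfl
      simp only [List.foldl_cons, hstep]
      rw [segm_loop_one]
      simp [List.replicate_succ]
    · rw [PySem.List.index?_cons_of_ne xs hx]
      have hstep : segmStepA (0, acc) x = (0, acc ++ [0]) := by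
        unfold segmStepA; simp [hx]
      simp only [List.foldl_cons, hstep]
      rw [ih]
      cases h : PySem.List.index? xs "|" with
      | none => simp [List.replicate_succ]
      | some k =>
        simp only [Option.map_some]
        have hk : k < xs.length := by
          obtain ⟨hk, _⟩ := PySem.List.getElem_of_index?_eq_some h
          exact hk
        have h1 : xs.length + 1 - (k + 1) = xs.length - k := by omega
        simp [List.replicate_succ, h1]

-- ===== VERDICT (by name: the statement is the Claim_ definition above) =====
theorem segm_id_spec : Claim_equal_segm_id := by
  intro xs _
  show segm_id xs = segm_id_alt xs
  unfold segm_id segm_id_alt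
  rw [segm_loop_zero]
  cases h : PySem.List.index? xs "|" with
  | none => simp
  | some k =>
    have hk : k < xs.length := by
      obtain ⟨hk, _⟩ := PySem.List.getElem_of_index?_eq_some h
      exact hk
    simp
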